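-- pv_equiv track=rewrite | github.com/Das-rebel/ChuckleNet | training/convert_standup_raw_to_word_level.py | apply_context_token_policy
-- ===== SOURCE A (Python) =====
-- from typing import DefaultDict, Dict, Iterable, List, Optional, Sequence, Set, Tuple
--
-- def is_punctuation_token(token: str) -> bool:
--     return bool(token) and all(not char.isalnum() for char in token)
--
-- def extract_last_non_empty_clause_tokens(context_words: Sequence[str]) -> List[str]:
--     clause_tokens: List[List[str]] = [[]]
--     for token in context_words:
--         if is_punctuation_token(token):
--             clause_tokens.append([])
--             continue
--         clause_tokens[-1].append(token)
--     non_empty = [clause for clause in clause_tokens if clause]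
--     return list(non_empty[-1]) if non_empty else []
--
-- def apply_context_token_policy(
--     context_words: Sequence[str],
--     policy: str,
--     context_tail_tokens: int,
-- ) -> List[str]:
--     if policy == "full":
--         return list(context_words)
--     if policy == "lexical_tail":
--         lexical_words = [word for word in context_words if not is_punctuation_token(word)]
--     elif policy == "clause_lexical_tail":
--         lexical_words = extract_last_non_empty_clause_tokens(context_words)
--     else:
--         raise ValueError(f"Unsupported context token policy: {policy}")
--     if context_tail_tokens <= 0:
--         return []
--     return lexical_words[-context_tail_tokens:]
-- ===== SOURCE B (Python) =====
-- def is_punctuation_token(token: str) -> bool: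
--     return bool(token) and all(not char.isalnum() for char in token)
--
-- def apply_context_token_policy(context_words, policy, context_tail_tokens):
--     if policy == "full":
--         return list(context_words)
--     if policy not in ("lexical_tail", "clause_lexical_tail"):
--         raise ValueError(f"Unsupported context token policy: {policy}")
--     if context_tail_tokens <= 0:
--         return []
--     clause_mode = policy == "clause_lexical_tail"
--     buf = []
--     for token in reversed(context_words):
--         if is_punctuation_token(token):
--             if clause_mode and buf:
--                 break
--             continue
--         buf.append(token)
--         if len(buf) == context_tail_tokens:
--             break
--     buf.reverse()
--     return buf
-- ===== Notes on version B (the rewrite author's own statement) =====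
-- stated objective: alternative
-- what changed: Replaces the forward clause-building (list of clause lists, filter non-empty, take last) and the filter-then-negative-slice with a single reverse scan that keeps only the current tail run and stops as soon as context_tail_tokens tokens are collected or (in clause mode) a punctuation token ends the run.
import Mathlib
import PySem

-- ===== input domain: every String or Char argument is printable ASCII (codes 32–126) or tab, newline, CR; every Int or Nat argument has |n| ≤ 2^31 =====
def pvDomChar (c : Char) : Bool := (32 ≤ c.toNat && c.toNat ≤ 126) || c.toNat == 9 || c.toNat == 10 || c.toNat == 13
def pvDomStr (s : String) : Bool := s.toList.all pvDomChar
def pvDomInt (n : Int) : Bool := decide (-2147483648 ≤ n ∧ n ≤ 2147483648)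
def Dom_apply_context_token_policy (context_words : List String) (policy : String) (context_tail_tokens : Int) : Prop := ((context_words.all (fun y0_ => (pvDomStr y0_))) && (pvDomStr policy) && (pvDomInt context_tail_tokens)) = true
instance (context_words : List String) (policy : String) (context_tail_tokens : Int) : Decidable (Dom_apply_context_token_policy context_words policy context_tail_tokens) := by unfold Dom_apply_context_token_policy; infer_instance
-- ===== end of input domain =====

-- B replaces A's forward clause-building and filter-then-slice with one reverse scan
-- that maintains only the current tail run (alternative decomposition, same cost).

-- ===== PORT A =====
-- is_punctuation_token: bool(token) and all(not char.isalnum() for char in token)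
def pvIsPunct (token : String) : Bool :=
  (!token.toList.isEmpty) && token.toList.all (fun c => !(PySem.Chars.isalnum c))

-- extract_last_non_empty_clause_tokens; clause_tokens[-1].append is modelled as
-- dropLast ++ [getLastD [] ++ [token]] (the list starts non-empty and stays non-empty)
def pvExtractLast (context_words : List String) : List String :=
  let clause_tokens := context_words.foldl
    (fun ct token =>
      if pvIsPunct token then ct ++ [[]]
      else ct.dropLast ++ [ct.getLastD [] ++ [token]])
    [[]]
  let non_empty := clause_tokens.filter (fun clause => !clause.isEmpty)
  non_empty.getLastD []   -- list(non_empty[-1]) if non_empty else []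

def apply_context_token_policy (context_words : List String) (policy : String) (context_tail_tokens : Int) : List String :=
  if policy == "full" then context_words
  else
    let lexical_words :=
      if policy == "lexical_tail" then context_words.filter (fun word => !pvIsPunct word)
      else if policy == "clause_lexical_tail" then pvExtractLast context_words
      else []   -- Python raises ValueError here; excluded by Pre_
    if context_tail_tokens ≤ 0 then []
    else PySem.List.slice lexical_words (some (-context_tail_tokens)) none   -- lexical_words[-k:]

-- ===== PORT B =====
-- reverse scan: skip punctuation (in clause mode a punctuation token after the first
-- collected word breaks), append words, stop once context_tail_tokens words collected
def pvBloop (clause_mode : Bool) (k : Int) : List String → List String → List String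
  | buf, [] => buf
  | buf, token :: rest =>
    if pvIsPunct token then
      if clause_mode && !buf.isEmpty then buf else pvBloop clause_mode k buf rest
    else
      let buf' := buf ++ [token]
      if (buf'.length : Int) = k then buf' else pvBloop clause_mode k buf' rest

def apply_context_token_policy_alt (context_words : List String) (policy : String) (context_tail_tokens : Int) : List String :=
  if policy == "full" then context_words
  else if !(policy == "lexical_tail" || policy == "clause_lexical_tail") then []   -- raise ValueError; outside Pre_
  else if context_tail_tokens ≤ 0 then []
  else (pvBloop (policy == "clause_lexical_tail") context_tail_tokens [] context_words.reverse).reverse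

-- ===== PRECONDITION & SPEC =====
-- Pre_ admits exactly the three supported policies; on any other policy both Pythons raise ValueError.
def Pre_apply_context_token_policy (context_words : List String) (policy : String) (context_tail_tokens : Int) : Prop :=
  policy = "full" ∨ policy = "lexical_tail" ∨ policy = "clause_lexical_tail"
instance (context_words : List String) (policy : String) (context_tail_tokens : Int) : Decidable (Pre_apply_context_token_policy context_words policy context_tail_tokens) := by unfold Pre_apply_context_token_policy; infer_instance

def pvWitness_apply_context_token_policy : List String × String × Int := (["hi", ",", "there"], "clause_lexical_tail", 2)

def Spec_apply_context_token_policy (context_words : List String) (policy : String) (context_tail_tokens : Int) (out : List String) : Prop := out = apply_context_token_policy_alt context_words policy context_tail_tokens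
instance (context_words : List String) (policy : String) (context_tail_tokens : Int) (out : List String) : Decidable (Spec_apply_context_token_policy context_words policy context_tail_tokens out) := by unfold Spec_apply_context_token_policy; infer_instance

-- ===== CLAIM (what is proved, stated in full; the proofs are below) =====
def Claim_equal_apply_context_token_policy : Prop := ∀ (context_words : List String) (policy : String) (context_tail_tokens : Int), Dom_apply_context_token_policy context_words policy context_tail_tokens → Pre_apply_context_token_policy context_words policy context_tail_tokens → Spec_apply_context_token_policy context_words policy context_tail_tokens (apply_context_token_policy context_words policy context_tail_tokens)

-- ===== LEMMAS AND PROOFS =====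

-- B's loop in lexical_tail mode: collect the first (k - |buf|) non-punctuation tokens
lemma pvBloop_false (k : Int) :
    ∀ (l buf : List String), (buf.length : Int) < k →
      pvBloop false k buf l = buf ++ (l.filter (fun t => !pvIsPunct t)).take (k.toNat - buf.length)
  | [], buf, _ => by simp [pvBloop]
  | t :: rest, buf, h => by
    by_cases hp : pvIsPunct t
    · simp only [pvBloop, hp, if_true, Bool.false_and]
      rw [pvBloop_false k rest buf h]
      simp [hp]
    · by_cases he : ((buf ++ [t]).length : Int) = k
      · simp only [List.length_append, List.length_cons, List.length_nil] at he
        have hm : k.toNat - buf.length = 1 := by omega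
        simp [pvBloop, hp, he, hm]
      · have h' : ((buf ++ [t]).length : Int) < k := by simp at he ⊢; omega
        simp only [pvBloop, hp, if_neg he]
        rw [pvBloop_false k rest (buf ++ [t]) h']
        have hm : k.toNat - buf.length = (k.toNat - (buf.length + 1)) + 1 := by
          simp at h'; omega
        simp [hp, hm, List.take_succ_cons]

-- B's loop in clause mode once the run has started: punctuation breaks, cap at k
lemma pvBloop_true_run (k : Int) :
    ∀ (l buf : List String), buf ≠ [] → (buf.length : Int) < k →
      pvBloop true k buf l = buf ++ (l.takeWhile (fun t => !pvIsPunct t)).take (k.toNat - buf.length)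
  | [], buf, _, _ => by simp [pvBloop]
  | t :: rest, buf, hb, h => by
    by_cases hp : pvIsPunct t
    · simp [pvBloop, hp, hb, List.takeWhile_cons]
    · by_cases he : ((buf ++ [t]).length : Int) = k
      · simp only [List.length_append, List.length_cons, List.length_nil] at he
        have hm : k.toNat - buf.length = 1 := by omega
        simp [pvBloop, hp, he, hm, List.takeWhile_cons]
      · have h' : ((buf ++ [t]).length : Int) < k := by simp at he ⊢; omega
        simp only [pvBloop, hp, if_neg he]
        rw [pvBloop_true_run k rest (buf ++ [t]) (by simp) h']
        have hm : k.toNat - buf.length = (k.toNat - (buf.length + 1)) + 1 := by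
          simp at h'; omega
        simp [hp, hm, List.takeWhile_cons, List.take_succ_cons]

-- B's loop in clause mode from the start: skip leading punctuation, collect the run
lemma pvBloop_true (k : Int) (hk : 0 < k) :
    ∀ (l : List String),
      pvBloop true k [] l = ((l.dropWhile pvIsPunct).takeWhile (fun t => !pvIsPunct t)).take k.toNat
  | [] => by simp [pvBloop]
  | t :: rest => by
    by_cases hp : pvIsPunct t
    · simp only [pvBloop, hp, if_true, List.isEmpty_nil, Bool.not_true, Bool.and_false,
        Bool.false_eq_true, List.dropWhile_cons_of_pos]
      exact pvBloop_true k hk rest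
    · by_cases he : (([t] : List String).length : Int) = k
      · simp only [List.length_cons, List.length_nil] at he
        have hm : k.toNat = 1 := by omega
        simp [pvBloop, hp, he, hm, List.dropWhile_cons_of_neg, List.takeWhile_cons]
      · have h' : (([t] : List String).length : Int) < k := by simp at he ⊢; omega
        simp only [pvBloop, hp, List.nil_append, if_neg he]
        rw [show (pvBloop true k [t]) = (pvBloop true k ([] ++ [t])) by simp,
          pvBloop_true_run k rest ([] ++ [t]) (by simp) (by simpa using h')]
        have hm : k.toNat = (k.toNat - 1) + 1 := by simp at h'; omega
        simp only [List.nil_append, List.length_cons, List.length_nil,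
          List.dropWhile_cons_of_neg hp, List.takeWhile_cons, hp, Bool.not_false, if_true]
        rw [hm]
        simp

-- A's clause fold: the running last clause is the reversed tail run of non-punctuation tokens
lemma pvFold_last (ws : List String) :
    (ws.foldl (fun ct token =>
        if pvIsPunct token then ct ++ [[]]
        else ct.dropLast ++ [ct.getLastD [] ++ [token]]) [[]]).getLastD []
      = (ws.reverse.takeWhile (fun t => !pvIsPunct t)).reverse := by
  induction ws using List.reverseRecOn with
  | nil => simp
  | append_singleton ws t ih =>
    simp only [List.foldl_append, List.foldl_cons, List.foldl_nil,
      List.reverse_append, List.reverse_cons, List.reverse_nil, List.nil_append,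
      List.singleton_append]
    by_cases hp : pvIsPunct t
    · simp [hp, List.takeWhile_cons]
    · rw [if_neg hp, List.getLastD_concat, ih]
      simp [hp, List.takeWhile_cons]

-- the last non-empty clause of A's fold, read from the right end
lemma pvFold_filter_last (ws : List String) :
    ((ws.foldl (fun ct token =>
        if pvIsPunct token then ct ++ [[]]
        else ct.dropLast ++ [ct.getLastD [] ++ [token]]) [[]]).filter
          (fun clause => !clause.isEmpty)).getLastD []
      = ((ws.reverse.dropWhile pvIsPunct).takeWhile (fun t => !pvIsPunct t)).reverse := by
  induction ws using List.reverseRecOn with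
  | nil => simp
  | append_singleton ws t ih =>
    simp only [List.foldl_append, List.foldl_cons, List.foldl_nil,
      List.reverse_append, List.reverse_cons, List.reverse_nil, List.nil_append,
      List.singleton_append]
    by_cases hp : pvIsPunct t
    · simpa [hp, List.filter_append, List.dropWhile_cons_of_pos] using ih
    · rw [if_neg hp, List.filter_append, List.filter_singleton]
      rw [show ∀ (l : List String) (x : String), (!(l ++ [x]).isEmpty) = true from by intro l x; simp]
      rw [cond_true]
      rw [List.getLastD_concat, pvFold_last ws]
      simp [hp]

-- A's clause extraction read from the right end
lemma pvExtractLast_eq (ws : List String) :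
    pvExtractLast ws = ((ws.reverse.dropWhile pvIsPunct).takeWhile (fun t => !pvIsPunct t)).reverse := by
  unfold pvExtractLast
  exact pvFold_filter_last ws

-- ===== VERDICT (by name: the statement is the Claim_ definition above) =====
theorem apply_context_token_policy_spec : Claim_equal_apply_context_token_policy := by
  intro ws policy k _hdom hpre
  unfold Spec_apply_context_token_policy
  rcases hpre with h | h | h <;> subst h
  · simp [apply_context_token_policy, apply_context_token_policy_alt]
  · by_cases hk : k ≤ 0
    · simp [apply_context_token_policy, apply_context_token_policy_alt, hk]
    · have hk' : (0 : Int) < k := by omega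
      have hkeq : -k = -((k.toNat : Nat) : Int) := by omega
      have hkpos : 0 < k.toNat := by omega
      simp only [apply_context_token_policy, apply_context_token_policy_alt]
      simp [hk]
      rw [pvBloop_false k ws.reverse [] (by simpa using hk')]
      rw [hkeq, PySem.List.slice_from_neg_natCast _ _ hkpos]
      simp only [List.filter_reverse, List.nil_append, List.length_nil, Nat.sub_zero,
        List.take_reverse, List.reverse_reverse]
  · by_cases hk : k ≤ 0
    · simp [apply_context_token_policy, apply_context_token_policy_alt, hk]
    · have hk' : (0 : Int) < k := by omega
      have hkeq : -k = -((k.toNat : Nat) : Int) := by omega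
      have hkpos : 0 < k.toNat := by omega
      simp only [apply_context_token_policy, apply_context_token_policy_alt]
      simp [hk]
      rw [pvBloop_true k hk' ws.reverse, pvExtractLast_eq ws]
      rw [hkeq, PySem.List.slice_from_neg_natCast _ _ hkpos]
      rw [List.reverse_take]
      simp
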